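-- pv_equiv track=rewrite | github.com/OCWC22/rlm-mcp-server | scripts/install_clients.py | _split_toml_path
-- ===== SOURCE A (Python) =====
-- def _split_toml_path(path: str) -> list[str]:
--     parts: list[str] = []
--     buf: list[str] = []
--     in_quotes = False
--     escape = False
--     for ch in path:
--         if in_quotes:
--             if escape:
--                 buf.append(ch)
--                 escape = False
--                 continue
--             if ch == "\\":
--                 escape = True
--                 continue
--             if ch == '"':
--                 in_quotes = False
--                 continue
--             buf.append(ch)
--             continue
--
--         if ch == '"':
--             in_quotes = True
--             continue
--         if ch == ".":
--             seg = "".join(buf).strip()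
--             if seg:
--                 parts.append(seg)
--             buf = []
--             continue
--         buf.append(ch)
--
--     seg = "".join(buf).strip()
--     if seg:
--         parts.append(seg)
--     return parts
-- ===== SOURCE B (Python) =====
-- def _split_toml_path(path: str) -> list[str]:
--     parts: list[str] = []
--     buf: list[str] = []
--     i = 0
--     n = len(path)
--     while i < n:
--         ch = path[i]
--         if ch == ".":
--             seg = "".join(buf).strip()
--             if seg:
--                 parts.append(seg)
--             buf = []
--             i += 1
--         elif ch == '"':
--             i += 1
--             while i < n:
--                 c = path[i]
--                 if c == "\\":
--                     if i + 1 < n: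
--                         buf.append(path[i + 1])
--                     i += 2
--                 elif c == '"':
--                     i += 1
--                     break
--                 else:
--                     buf.append(c)
--                     i += 1
--         else:
--             buf.append(ch)
--             i += 1
--     seg = "".join(buf).strip()
--     if seg:
--         parts.append(seg)
--     return parts
-- ===== Notes on version B (the rewrite author's own statement) =====
-- stated objective: alternative
-- what changed: Replaces A's single for-loop with persistent in_quotes/escape state flags by an index-based outer while-loop that dispatches per segment character and a nested inner while-loop that consumes an entire quoted region (handling backslash escapes by lookahead) before returning to the outer scan.
import Mathlib
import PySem

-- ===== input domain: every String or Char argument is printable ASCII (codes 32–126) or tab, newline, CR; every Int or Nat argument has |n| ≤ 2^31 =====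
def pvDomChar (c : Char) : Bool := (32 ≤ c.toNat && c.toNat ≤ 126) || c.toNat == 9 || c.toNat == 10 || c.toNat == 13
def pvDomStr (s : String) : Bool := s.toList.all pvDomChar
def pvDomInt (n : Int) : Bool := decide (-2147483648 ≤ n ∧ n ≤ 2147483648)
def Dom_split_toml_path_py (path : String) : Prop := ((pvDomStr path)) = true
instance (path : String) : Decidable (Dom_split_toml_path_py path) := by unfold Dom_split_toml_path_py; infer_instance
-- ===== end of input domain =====

-- B replaces A's persistent in_quotes/escape state flags by an index scan with a nested
-- inner loop for quoted regions (objective: alternative decomposition, same cost).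

-- ===== PORT A =====
-- state: (parts, buf, in_quotes, escape); one fold step per character, as in A's for-loop
def pvAStep (st : List String × List Char × Bool × Bool) (ch : Char) :
    List String × List Char × Bool × Bool :=
  let (parts, buf, inq, esc) := st
  if inq then
    if esc then (parts, buf ++ [ch], true, false)
    else if ch = '\\' then (parts, buf, true, true)
    else if ch = '"' then (parts, buf, false, false)
    else (parts, buf ++ [ch], true, false)
  else
    if ch = '"' then (parts, buf, true, false)
    else if ch = '.' then
      let seg := PySem.Str.strip (String.ofList buf)
      (if seg ≠ "" then parts ++ [seg] else parts, ([] : List Char), false, false)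
    else (parts, buf ++ [ch], false, false)

-- the final ''.join(buf).strip() flush of A
def pvFlush (st : List String × List Char × Bool × Bool) : List String :=
  let (parts, buf, _, _) := st
  let seg := PySem.Str.strip (String.ofList buf)
  if seg ≠ "" then parts ++ [seg] else parts

def split_toml_path_py (path : String) : List String :=
  pvFlush (path.toList.foldl pvAStep ([], [], false, false))

-- ===== PORT B =====
-- inner while-loop of B: scan the quoted region, return (new buf, remaining input)
def pvBQuote : List Char → List Char → List Char × List Char
  | [], buf => (buf, [])
  | c :: rest, buf =>
    if c = '\\' then
      match rest with
      | [] => (buf, [])            -- dangling backslash at end of string: dropped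
      | d :: rest' => pvBQuote rest' (buf ++ [d])
    else if c = '"' then (buf, rest)
    else pvBQuote rest (buf ++ [c])

theorem pvBQuote_len (l buf : List Char) : (pvBQuote l buf).2.length ≤ l.length := by
  fun_induction pvBQuote l buf <;> simp_all <;> omega

-- outer while-loop of B over the remaining characters
def pvBMain : List Char → List String → List Char → List String
  | [], parts, buf =>
    let seg := PySem.Str.strip (String.ofList buf)
    if seg ≠ "" then parts ++ [seg] else parts
  | ch :: rest, parts, buf =>
    if ch = '.' then
      let seg := PySem.Str.strip (String.ofList buf)
      pvBMain rest (if seg ≠ "" then parts ++ [seg] else parts) []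
    else if ch = '"' then
      let p := pvBQuote rest buf
      pvBMain p.2 parts p.1
    else pvBMain rest parts (buf ++ [ch])
termination_by l _ _ => l.length
decreasing_by
  all_goals first
    | exact Nat.lt_succ_of_le (pvBQuote_len rest buf)
    | simp

def split_toml_path_py_alt (path : String) : List String :=
  pvBMain path.toList [] []

-- ===== PRECONDITION & SPEC =====
def Spec_split_toml_path_py (path : String) (out : List String) : Prop := out = split_toml_path_py_alt path
instance (path : String) (out : List String) : Decidable (Spec_split_toml_path_py path out) := by unfold Spec_split_toml_path_py; infer_instance

-- ===== CLAIM (what is proved, stated in full; the proofs are below) =====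
def Claim_equal_split_toml_path_py : Prop := ∀ (path : String), Dom_split_toml_path_py path → Spec_split_toml_path_py path (split_toml_path_py path)

-- ===== LEMMAS AND PROOFS =====

theorem pvBQuote_quote (rest buf) : pvBQuote ('"' :: rest) buf = (buf, rest) := by
  rw [pvBQuote.eq_def]; simp

theorem pvBQuote_bs (d rest' buf) : pvBQuote ('\\' :: d :: rest') buf = pvBQuote rest' (buf ++ [d]) := by
  rw [pvBQuote.eq_def]; simp

theorem pvBQuote_bs_nil (buf) : pvBQuote ['\\'] buf = (buf, []) := by
  rw [pvBQuote.eq_def]; simp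

theorem pvBQuote_other (c rest buf) (hb : c ≠ '\\') (hq : c ≠ '"') :
    pvBQuote (c :: rest) buf = pvBQuote rest (buf ++ [c]) := by
  rw [pvBQuote.eq_def]; simp [hb, hq]


-- combined invariant: scanning from normal mode agrees with pvBMain, and scanning from
-- quote mode agrees with pvBQuote-then-pvBMain; strong induction on the length.
theorem pv_combined : ∀ (n : Nat) (l : List Char), l.length ≤ n →
    (∀ parts buf, pvFlush (l.foldl pvAStep (parts, buf, false, false)) = pvBMain l parts buf) ∧
    (∀ parts buf, pvFlush (l.foldl pvAStep (parts, buf, true, false)) =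
        pvBMain (pvBQuote l buf).2 parts (pvBQuote l buf).1) := by
  intro n
  induction n with
  | zero =>
    intro l hl
    have : l = [] := List.eq_nil_of_length_eq_zero (Nat.le_zero.mp hl)
    subst this
    constructor <;> intro parts buf <;> simp [pvFlush, pvBMain, pvBQuote]
  | succ n ih =>
    intro l hl
    match l with
    | [] =>
      constructor <;> intro parts buf <;> simp [pvFlush, pvBMain, pvBQuote]
    | ch :: rest =>
      have hr : rest.length ≤ n := by simpa using Nat.lt_succ_iff.mp (by simpa using hl)
      constructor
      · intro parts buf
        by_cases hq : ch = '"'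
        · subst hq
          rw [List.foldl_cons]
          have := (ih rest hr).2 parts buf
          simpa [pvAStep, pvBMain] using this
        · by_cases hd : ch = '.'
          · subst hd
            rw [List.foldl_cons]
            have := (ih rest hr).1
              (if PySem.Str.strip (String.ofList buf) ≠ "" then parts ++ [PySem.Str.strip (String.ofList buf)] else parts) []
            simpa [pvAStep, pvBMain] using this
          · rw [List.foldl_cons]
            have := (ih rest hr).1 parts (buf ++ [ch])
            simpa [pvAStep, pvBMain, hq, hd] using this
      · intro parts buf
        by_cases hb : ch = '\\'
        · subst hb
          rw [List.foldl_cons]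
          match rest with
          | [] => simp [pvAStep, pvFlush, pvBQuote_bs_nil, pvBMain]
          | d :: rest' =>
            have hr' : rest'.length ≤ n := by
              simp at hl; omega
            rw [List.foldl_cons]
            have := (ih rest' hr').2 parts (buf ++ [d])
            simpa [pvAStep, pvBQuote_bs] using this
        · by_cases hq : ch = '"'
          · subst hq
            rw [List.foldl_cons]
            have := (ih rest hr).1 parts buf
            simpa [pvAStep, pvBQuote_quote] using this
          · rw [List.foldl_cons]
            have := (ih rest hr).2 parts (buf ++ [ch])
            simpa [pvAStep, pvBQuote_other ch rest buf hb hq, hb, hq] using this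

-- ===== VERDICT (by name: the statement is the Claim_ definition above) =====
theorem split_toml_path_py_spec : Claim_equal_split_toml_path_py := by
  intro path _
  unfold Spec_split_toml_path_py split_toml_path_py split_toml_path_py_alt
  exact (pv_combined path.toList.length path.toList le_rfl).1 [] []
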